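-- pv_equiv track=rewrite | github.com/hyunzsu/Algorithm | 프로그래머스/1/135808. 과일 장수/과일 장수.py | solution
-- ===== SOURCE A (Python) =====
-- def solution(k, m, score):
--     res = 0
--     apple = sorted(score, reverse=True)
--     for i in range(0, len(apple), m):
--         if i + m > len(apple):
--             break
--         res += apple[i+m-1] * m
--     return res
-- ===== SOURCE B (Python) =====
-- def solution(k, m, score):
--     # Frequency map + rank arithmetic: no full sort of score, no per-group indexing.
--     # Group minima sit at descending ranks t*m + m - 1 for t < len(score)//m; walking
--     # the distinct values from high to low, each value v owns a contiguous rank block,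
--     # and the number of group-minimum ranks inside it is a floor-division difference.
--     cnt = {}
--     for v in score:
--         cnt[v] = cnt.get(v, 0) + 1
--     limit = (len(score) // m) * m          # ranks past this are the discarded remainder
--     res = 0
--     p = 0                                  # ranks already covered by larger values
--     for v in sorted(cnt, reverse=True):
--         hi = min(p + cnt[v], limit)
--         res += v * m * (hi // m - min(p, limit) // m)
--         p += cnt[v]
--     return res
-- ===== Notes on version B (the rewrite author's own statement) =====
-- stated objective: alternative
-- what changed: B never sorts or indexes the score list itself: it builds a value-frequency dictionary, sorts only the distinct values descending, and for each value computes by floor-division rank arithmetic how many group-minimum ranks (t*m+m-1, t < len(score)//m) fall inside that value's contiguous rank block, replacing A's full descending sort plus break-guarded stride loop over element indices.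
-- outside the precondition, e.g. on solution(0, -2, [1, 2, 3]): A returns 0, B returns 8
import Mathlib
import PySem

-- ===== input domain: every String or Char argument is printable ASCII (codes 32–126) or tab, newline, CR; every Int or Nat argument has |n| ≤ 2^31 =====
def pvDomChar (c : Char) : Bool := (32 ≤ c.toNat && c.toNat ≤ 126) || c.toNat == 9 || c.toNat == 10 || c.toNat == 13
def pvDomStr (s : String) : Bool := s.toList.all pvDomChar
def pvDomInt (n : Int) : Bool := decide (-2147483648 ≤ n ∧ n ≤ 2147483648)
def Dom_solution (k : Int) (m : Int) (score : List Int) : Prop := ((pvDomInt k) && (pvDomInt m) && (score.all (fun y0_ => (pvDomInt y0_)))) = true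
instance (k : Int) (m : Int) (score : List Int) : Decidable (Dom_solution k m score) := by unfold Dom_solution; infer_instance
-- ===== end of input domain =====

-- B replaces A's full descending sort plus break-guarded stride loop by a value-frequency
-- dictionary: only the distinct values are sorted, and rank arithmetic (floor divisions)
-- counts the group-minimum ranks inside each value's block (alternative decomposition).

-- ===== PORT A =====
-- loop body of A's for-with-break: state = (res, broken); the guarded index i+m-1 is
-- always in range when read (i ≥ 0 and i+m ≤ len), so pyGetD's default is never used.
def aStep (m nI : Int) (apple : List Int) (st : Int × Bool) (i : Int) : Int × Bool :=
  if st.2 then st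
  else if i + m > nI then (st.1, true)
  else (st.1 + (PySem.List.pyGetD apple (i + m - 1) 0) * m, st.2)

def solution (k : Int) (m : Int) (score : List Int) : Int :=
  let apple := PySem.List.sorted score (fun x => x) true
  ((PySem.List.pyRange 0 (apple.length : Int) m).foldl
    (aStep m (apple.length : Int) apple) (0, false)).1

-- ===== PORT B =====
-- loop body of B's for over the sorted distinct values: state = (res, p)
def bStep (m limit : Int) (cnt : PySem.Dict Int Int) (st : Int × Int) (v : Int) : Int × Int :=
  let hi := min (st.2 + cnt.getD v 0) limit
  (st.1 + v * m * (PySem.Int.floordiv hi m - PySem.Int.floordiv (min st.2 limit) m),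
   st.2 + cnt.getD v 0)

def solution_alt (k : Int) (m : Int) (score : List Int) : Int :=
  let cnt := score.foldl (fun d x => d.insert x (d.getD x 0 + 1)) PySem.Dict.empty
  let limit := (PySem.Int.floordiv (score.length : Int) m) * m
  ((PySem.List.sorted cnt.keys (fun x => x) true).foldl (bStep m limit cnt) (0, 0)).1

-- ===== PRECONDITION & SPEC =====
-- Pre_ keeps only m ≥ 1, the natural domain of the task (m is a group size): at m = 0
-- Python A raises ValueError (range step 0) and B raises ZeroDivisionError; for m < 0
-- A's empty range returns 0 by accident while B's rank arithmetic does not apply there.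
def Pre_solution (k : Int) (m : Int) (score : List Int) : Prop := 1 ≤ m
instance (k : Int) (m : Int) (score : List Int) : Decidable (Pre_solution k m score) := by unfold Pre_solution; infer_instance
def pvWitness_solution : Int × Int × List Int := (4, 3, [1, 2, 3, 1, 2, 3, 1])

def Spec_solution (k : Int) (m : Int) (score : List Int) (out : Int) : Prop := out = solution_alt k m score
instance (k : Int) (m : Int) (score : List Int) (out : Int) : Decidable (Spec_solution k m score out) := by unfold Spec_solution; infer_instance

-- ===== CLAIM (what is proved, stated in full; the proofs are below) =====
def Claim_equal_solution : Prop := ∀ (k : Int) (m : Int) (score : List Int), Dom_solution k m score → Pre_solution k m score → Spec_solution k m score (solution k m score)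

-- ===== LEMMAS AND PROOFS =====

-- once broken, A's loop state never changes
theorem aStep_broken (m nI : Int) (apple : List Int) (L : List Int) (acc : Int) :
    L.foldl (aStep m nI apple) (acc, true) = (acc, true) := by
  induction L with
  | nil => rfl
  | cons x xs ih => simpa [aStep] using ih

-- while the break guard never fires, A's loop is a plain accumulating fold
theorem aStep_nofire (m nI : Int) (apple : List Int) (L : List Int) (acc : Int)
    (h : ∀ i ∈ L, ¬(i + m > nI)) :
    L.foldl (aStep m nI apple) (acc, false) =
      (L.foldl (fun a i => a + (PySem.List.pyGetD apple (i + m - 1) 0) * m) acc, false) := by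
  induction L generalizing acc with
  | nil => rfl
  | cons x xs ih =>
      have hx := h x (by simp)
      simp only [List.foldl_cons, aStep, Bool.false_eq_true, if_false, if_neg hx]
      exact ih _ (fun i hi => h i (by simp [hi]))

-- once every remaining index trips the guard, the loop contributes nothing
theorem aStep_allfire (m nI : Int) (apple : List Int) (L : List Int) (acc : Int)
    (h : ∀ i ∈ L, i + m > nI) :
    (L.foldl (aStep m nI apple) (acc, false)).1 = acc := by
  cases L with
  | nil => rfl
  | cons x xs =>
      have hx := h x (by simp)
      simp only [List.foldl_cons, aStep, Bool.false_eq_true, if_false, if_pos hx]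
      rw [aStep_broken]

theorem foldl_add_eq_sum (h : Int → Int) (L : List Int) (acc : Int) :
    L.foldl (fun a i => a + h i) acc = acc + (L.map h).sum := by
  induction L generalizing acc with
  | nil => simp
  | cons x xs ih => simp [ih, add_assoc]

theorem sum_list_range (f : Nat → Int) (n : Nat) :
    ((List.range n).map f).sum = ∑ i ∈ Finset.range n, f i := by
  induction n with
  | zero => simp
  | succ n ih => simp [List.range_succ, Finset.sum_range_succ, ih]

theorem ceil_div_eq (mp g rp : Nat) (hmp : 0 < mp) (hrp : rp < mp) :
    (g * mp + rp + mp - 1) / mp = g + (if rp = 0 then 0 else 1) := by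
  rcases Nat.eq_zero_or_pos rp with h | h
  · subst h
    rw [show g * mp + 0 + mp - 1 = mp * g + (mp - 1) by rw [Nat.mul_comm]; omega,
        Nat.mul_add_div hmp, Nat.div_eq_of_lt (by omega)]
    simp
  · have h1 : (rp + mp - 1) / mp = 1 := by apply Nat.div_eq_of_lt_le <;> omega
    rw [if_neg (by omega),
        show g * mp + rp + mp - 1 = mp * g + (rp + mp - 1) by rw [Nat.mul_comm]; omega,
        Nat.mul_add_div hmp, h1]

-- A equals m times the sum of the descending group minima, expressed with Nat indices
theorem A_sum (k m : Int) (score : List Int) (mp : Nat)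
    (hm : 1 ≤ m) (hmp : (mp : Nat) = m.toNat) :
    solution k m score =
      (∑ t ∈ Finset.range (score.length / mp),
        (PySem.List.sorted score (fun x => x) true).getD (t * mp + mp - 1) 0) * m := by
  have hmpI : (mp : Int) = m := by rw [hmp]; exact Int.toNat_of_nonneg (by omega)
  have hmp0 : 0 < mp := by omega
  set desc := PySem.List.sorted score (fun x => x) true with hdesc
  have hlen : desc.length = score.length := PySem.List.length_sorted _ _ _
  set n := score.length with hn
  obtain ⟨g, hg⟩ : ∃ g, n / mp = g := ⟨_, rfl⟩
  obtain ⟨rp, hrp⟩ : ∃ rp, n % mp = rp := ⟨_, rfl⟩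
  have hnr : g * mp + rp = n := by
    rw [← hg, ← hrp, Nat.mul_comm]; exact Nat.div_add_mod n mp
  have hrpm : rp < mp := by rw [← hrp]; exact Nat.mod_lt _ hmp0
  unfold solution
  simp only [← hdesc, hlen]
  rw [PySem.List.pyRange_of_pos 0 (n : Int) (by omega)]
  have hcA : (if (0 : Int) < (n : Int) then (((n : Int) - 0 + m - 1) / m).toNat else 0)
      = g + (if rp = 0 then 0 else 1) := by
    by_cases h0 : 0 < n
    · rw [if_pos (by exact_mod_cast h0)]
      have h1 : (n : Int) - 0 + m - 1 = ((n + mp - 1 : Nat) : Int) := by rw [← hmpI]; omega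
      rw [h1, ← hmpI, ← Int.natCast_ediv, Int.toNat_natCast,
          show n + mp - 1 = g * mp + rp + mp - 1 by omega,
          ceil_div_eq mp g rp hmp0 hrpm]
    · rw [if_neg (by exact_mod_cast h0)]
      have hn0 : n = 0 := by omega
      have h2 : rp = 0 := by omega
      have h3 : g * mp = 0 := by omega
      rcases Nat.mul_eq_zero.1 h3 with h4 | h4
      · simp [h4, h2]
      · omega
  rw [hcA, List.range_add, List.map_append, List.foldl_append]
  have hfire1 : ∀ i ∈ (List.range g).map (fun k : Nat => (0 : Int) + m * (k : Int)),
      ¬(i + m > (n : Int)) := by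
    intro i hi
    simp only [List.mem_map, List.mem_range] at hi
    obtain ⟨t, ht, rfl⟩ := hi
    have hNat : mp * t + mp ≤ n := by
      have h1 : (t + 1) * mp ≤ g * mp := Nat.mul_le_mul_right mp (by omega)
      have h2 : mp * t + mp = (t + 1) * mp := by ring
      omega
    simp only [gt_iff_lt, not_lt, zero_add, ← hmpI]
    exact_mod_cast hNat
  have hfire2 : ∀ i ∈ ((List.range (if rp = 0 then 0 else 1)).map (fun x => g + x)).map
      (fun k : Nat => (0 : Int) + m * (k : Int)), i + m > (n : Int) := by
    intro i hi
    simp only [List.mem_map, List.mem_range] at hi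
    obtain ⟨j, ⟨t, ht, rfl⟩, rfl⟩ := hi
    have hNat : n < mp * (g + t) + mp := by
      have h1 : mp * g ≤ mp * (g + t) := Nat.mul_le_mul_left mp (by omega)
      have h2 : mp * g = g * mp := Nat.mul_comm _ _
      omega
    simp only [gt_iff_lt, zero_add, ← hmpI]
    exact_mod_cast hNat
  rw [aStep_nofire m (n : Int) desc _ 0 hfire1,
      aStep_allfire m (n : Int) desc _ _ hfire2,
      foldl_add_eq_sum, List.map_map, zero_add, sum_list_range, hg, Finset.sum_mul]
  apply Finset.sum_congr rfl
  intro t ht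
  simp only [Finset.mem_range] at ht
  have hone : 1 ≤ mp * t + mp := by omega
  have hidx : (0 : Int) + m * (t : Int) + m - 1 = ((t * mp + mp - 1 : Nat) : Int) := by
    rw [← hmpI]
    have : t * mp = mp * t := Nat.mul_comm _ _
    push_cast [Nat.cast_sub (by omega : 1 ≤ t * mp + mp)]
    ring
  rw [Function.comp, hidx, PySem.List.pyGetD_natCast]

-- ----- B-side structure lemmas -----

theorem count_flatMap_rep (score : List Int) (x : Int) : ∀ (l : List Int), l.Nodup →
    (l.flatMap (fun v => List.replicate (score.count v) v)).count x
      = if x ∈ l then score.count x else 0 := by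
  intro l
  induction l with
  | nil => simp
  | cons a rest ih =>
      intro hnd
      rw [List.flatMap_cons, List.count_append, ih (List.nodup_cons.1 hnd).2,
          List.count_replicate]
      by_cases hxa : x = a
      · subst hxa
        simp [(List.nodup_cons.1 hnd).1]
      · have hxa' : ¬ a = x := fun h => hxa h.symm
        simp [hxa, hxa']

theorem pairwise_flatMap_rep (score : List Int) : ∀ (l : List Int),
    l.Pairwise (fun a b => b < a) →
    (l.flatMap (fun v => List.replicate (score.count v) v)).Pairwise
      (fun a b : Int => b ≤ a) := by
  intro l
  induction l with
  | nil => simp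
  | cons a rest ih =>
      intro hpw
      rw [List.flatMap_cons]
      apply List.pairwise_append.2
      refine ⟨?_, ih (List.pairwise_cons.1 hpw).2, ?_⟩
      · exact List.pairwise_replicate.2 (Or.inr le_rfl)
      · intro x hx y hy
        have hxa : x = a := List.eq_of_mem_replicate hx
        obtain ⟨v, hv, hyv⟩ := List.mem_flatMap.1 hy
        have hyv' : y = v := List.eq_of_mem_replicate hyv
        rw [hxa, hyv']
        exact le_of_lt ((List.pairwise_cons.1 hpw).1 v hv)

theorem keysD_nodup (score : List Int) :
    (PySem.List.sorted (PySem.Set.ofList score) (fun x : Int => x) true).Nodup :=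
  ((PySem.List.sorted_perm _ _ _).nodup_iff).2 (PySem.Set.nodup_ofList score)

theorem keysD_pairwise_gt (score : List Int) :
    (PySem.List.sorted (PySem.Set.ofList score) (fun x : Int => x) true).Pairwise
      (fun a b => b < a) := by
  have h1 := PySem.List.sorted_pairwise_rev (PySem.Set.ofList score) (fun x : Int => x)
  have h2 := keysD_nodup score
  exact (h1.and h2).imp (fun hab => lt_of_le_of_ne hab.1 (Ne.symm hab.2))

-- sorted(score, reverse=True) is the concatenation of the constant blocks of each
-- distinct value, taken in descending value order
theorem desc_eq_blocks (score : List Int) :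
    PySem.List.sorted score (fun x => x) true
      = (PySem.List.sorted (PySem.Set.ofList score) (fun x : Int => x) true).flatMap
          (fun v => List.replicate (score.count v) v) := by
  have hmem : ∀ x : Int,
      x ∈ PySem.List.sorted (PySem.Set.ofList score) (fun x : Int => x) true ↔ x ∈ score := by
    intro x
    simp [PySem.List.mem_sorted, PySem.Set.mem_ofList]
  have hperm : (PySem.List.sorted score (fun x => x) true).Perm
      ((PySem.List.sorted (PySem.Set.ofList score) (fun x : Int => x) true).flatMap
        (fun v => List.replicate (score.count v) v)) := by
    refine (PySem.List.sorted_perm score (fun x => x) true).trans (List.perm_iff_count.2 ?_)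
    intro x
    rw [count_flatMap_rep score x _ (keysD_nodup score)]
    by_cases hx : x ∈ score
    · rw [if_pos ((hmem x).2 hx)]
    · rw [if_neg (fun h => hx ((hmem x).1 h))]
      exact List.count_eq_zero_of_not_mem hx
  exact List.Perm.eq_of_pairwise (le := fun a b : Int => b ≤ a)
    (fun a b _ _ h1 h2 => le_antisymm h2 h1)
    (PySem.List.sorted_pairwise_rev score (fun x => x))
    (pairwise_flatMap_rep score _ (keysD_pairwise_gt score))
    hperm

-- min-capped floor division, in Nat
theorem fd_min (q g mp : Nat) (m : Int) (hm : 1 ≤ m) (hmpI : (mp : Int) = m) :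
    PySem.Int.floordiv (min (q : Int) ((g * mp : Nat) : Int)) m
      = ((min (q / mp) g : Nat) : Int) := by
  have hmp0 : 0 < mp := by omega
  rw [← hmpI, ← Nat.cast_min, PySem.Int.floordiv_natCast]
  congr 1
  rcases le_total q (g * mp) with h | h
  · rw [min_eq_left h, min_eq_left
      ((Nat.div_le_div_right h).trans (le_of_eq (Nat.mul_div_cancel g hmp0)))]
  · rw [min_eq_right h, min_eq_right
      (le_trans (le_of_eq (Nat.mul_div_cancel g hmp0).symm) (Nat.div_le_div_right h)),
      Nat.mul_div_cancel g hmp0]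

theorem Ico_min (a g : Nat) : Finset.Ico (min a g) g = Finset.Ico a g := by
  rcases le_total a g with h | h
  · rw [min_eq_left h]
  · rw [min_eq_right h, Finset.Ico_self]
    exact (Finset.Ico_eq_empty (not_lt.2 h)).symm

theorem getD_block (desc : List Int) (p c : Nat) (v : Int) (tail : List Int)
    (h : desc.drop p = List.replicate c v ++ tail) (j : Nat) (hj : j < c) :
    desc.getD (p + j) 0 = v := by
  rw [List.getD_eq_getElem?_getD, ← List.getElem?_drop, h,
      List.getElem?_append_left (by simpa using hj), List.getElem?_replicate, if_pos hj]
  rfl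

-- the fold invariant of B's loop over the remaining distinct values
theorem bfold (m limit : Int) (cnt : PySem.Dict Int Int) (score desc : List Int)
    (mp g : Nat) (hm : 1 ≤ m) (hmpI : (mp : Int) = m) (hg : g = score.length / mp)
    (hcnt : ∀ v, cnt.getD v 0 = (score.count v : Int))
    (hlimit : limit = ((g * mp : Nat) : Int))
    (hlen : desc.length = score.length) :
    ∀ (ks : List Int) (p : Nat) (acc : Int),
    desc.drop p = ks.flatMap (fun v => List.replicate (score.count v) v) →
    (ks.foldl (bStep m limit cnt) (acc, (p : Int))).1
      = acc + m * ∑ t ∈ Finset.Ico (p / mp) g, desc.getD (t * mp + mp - 1) 0 := by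
  have hmp0 : 0 < mp := by omega
  intro ks
  induction ks with
  | nil =>
      intro p acc hdrop
      have hple : desc.length ≤ p := by
        have h0 := congrArg List.length hdrop
        simp at h0
        omega
      have hg' : g ≤ p / mp := by
        rw [hg]; exact Nat.div_le_div_right (by omega)
      rw [List.foldl_nil, Finset.Ico_eq_empty (by omega)]
      simp
  | cons v rest ih =>
      intro p acc hdrop
      set c := score.count v with hc
      have hdropP : desc.drop p
          = List.replicate c v ++ rest.flatMap (fun v => List.replicate (score.count v) v) := by
        simpa [List.flatMap_cons, hc] using hdrop
      have hdropPC : desc.drop (p + c)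
          = rest.flatMap (fun v => List.replicate (score.count v) v) := by
        have hdd : desc.drop (p + c) = (desc.drop p).drop c := by
          rw [List.drop_drop, Nat.add_comm]
        rw [hdd, hdropP]
        exact List.drop_left' (by simp)
      rw [List.foldl_cons]
      have hcv : cnt.getD v 0 = (c : Int) := by rw [hcnt v, hc]
      have hstep : bStep m limit cnt (acc, (p : Int)) v
          = (acc + v * m * (((min ((p + c) / mp) g : Nat) : Int)
              - ((min (p / mp) g : Nat) : Int)), ((p + c : Nat) : Int)) := by
        simp only [bStep, hcv, hlimit]
        have e1 : (p : Int) + (c : Int) = ((p + c : Nat) : Int) := by push_cast; ring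
        rw [e1, fd_min (p + c) g mp m hm hmpI, fd_min p g mp m hm hmpI]
      rw [hstep, ih (p + c) _ hdropPC]
      set a := p / mp with ha
      set b := (p + c) / mp with hb
      have hab : a ≤ b := Nat.div_le_div_right (Nat.le_add_right p c)
      have hA'B' : min a g ≤ min b g := min_le_min hab le_rfl
      have hsplit : ∑ t ∈ Finset.Ico a g, desc.getD (t * mp + mp - 1) 0
          = (∑ t ∈ Finset.Ico (min a g) (min b g), desc.getD (t * mp + mp - 1) 0)
            + ∑ t ∈ Finset.Ico b g, desc.getD (t * mp + mp - 1) 0 := by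
        rw [← Ico_min a g, ← Finset.sum_Ico_consecutive _ hA'B' (min_le_right b g), Ico_min b g]
      have hval : ∀ t ∈ Finset.Ico (min a g) (min b g), desc.getD (t * mp + mp - 1) 0 = v := by
        intro t ht
        rw [Finset.mem_Ico] at ht
        have hta : a ≤ t := by
          rcases le_total a g with h | h
          · have h2 := ht.1; rw [min_eq_left h] at h2; exact h2
          · exfalso
            have h2 := ht.1; rw [min_eq_right h] at h2
            have h3 := lt_of_lt_of_le ht.2 (min_le_right b g)
            omega
        have htb : t < b := lt_of_lt_of_le ht.2 (min_le_left b g)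
        have hpa2 : p < a * mp + mp := by rw [ha]; exact Nat.lt_div_mul_add hmp0
        have h1 : a * mp ≤ t * mp := Nat.mul_le_mul_right mp hta
        have h2 : (t + 1) * mp ≤ b * mp := Nat.mul_le_mul_right mp htb
        have h3 : b * mp ≤ p + c := Nat.div_mul_le_self (p + c) mp
        have he : (t + 1) * mp = t * mp + mp := by ring
        obtain ⟨P, hP⟩ : ∃ x, t * mp = x := ⟨_, rfl⟩
        obtain ⟨Q, hQ⟩ : ∃ x, a * mp = x := ⟨_, rfl⟩
        obtain ⟨R, hR⟩ : ∃ x, b * mp = x := ⟨_, rfl⟩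
        obtain ⟨TT, hTT⟩ : ∃ x, (t + 1) * mp = x := ⟨_, rfl⟩
        rw [hQ, hP] at h1
        rw [hTT, hR] at h2
        rw [hR] at h3
        rw [hQ] at hpa2
        rw [hTT, hP] at he
        have hr1 : p ≤ P + mp - 1 := by omega
        have hr2 : P + mp - 1 < p + c := by omega
        have hgb := getD_block desc p c v _ hdropP (P + mp - 1 - p) (by omega)
        rw [show p + (P + mp - 1 - p) = P + mp - 1 by omega] at hgb
        rw [hP]
        exact hgb
      have hconst : ∑ t ∈ Finset.Ico (min a g) (min b g), desc.getD (t * mp + mp - 1) 0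
          = ((min b g - min a g : Nat) : Int) * v := by
        rw [Finset.sum_congr rfl hval, Finset.sum_const, Nat.card_Ico, nsmul_eq_mul]
      rw [hsplit, hconst, Nat.cast_sub hA'B']
      ring

-- B equals m times the same sum of descending group minima
theorem B_sum (k m : Int) (score : List Int) (mp : Nat)
    (hm : 1 ≤ m) (hmp : (mp : Nat) = m.toNat) :
    solution_alt k m score =
      m * ∑ t ∈ Finset.range (score.length / mp),
        (PySem.List.sorted score (fun x => x) true).getD (t * mp + mp - 1) 0 := by
  have hmpI : (mp : Int) = m := by rw [hmp]; exact Int.toNat_of_nonneg (by omega)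
  simp only [solution_alt]
  have hcnt0 : score.foldl (fun d x => d.insert x (d.getD x 0 + 1)) PySem.Dict.empty
      = PySem.Dict.counter score := PySem.Dict.foldl_insert_getD_add_one_eq_counter score
  rw [hcnt0, PySem.Dict.keys_counter]
  have hlimit : PySem.Int.floordiv ((score.length : Nat) : Int) m * m
      = (((score.length / mp) * mp : Nat) : Int) := by
    rw [← hmpI, PySem.Int.floordiv_natCast]
    push_cast
    ring
  rw [hlimit]
  have hmain := bfold m _ (PySem.Dict.counter score) score
    (PySem.List.sorted score (fun x => x) true) mp (score.length / mp) hm hmpI rfl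
    (fun v => PySem.Dict.getD_counter score v) rfl
    (PySem.List.length_sorted score (fun x => x) true)
    (PySem.List.sorted (PySem.Set.ofList score) (fun x : Int => x) true) 0 0
    (by simpa using desc_eq_blocks score)
  rw [show ((0 : Nat) : Int) = (0 : Int) by simp] at hmain
  rw [hmain, Nat.zero_div, zero_add, Finset.range_eq_Ico]

-- ===== VERDICT (by name: the statement is the Claim_ definition above) =====
theorem solution_spec : Claim_equal_solution := by
  intro k m score _ hpre
  unfold Pre_solution at hpre
  unfold Spec_solution
  rw [A_sum k m score m.toNat hpre rfl, B_sum k m score m.toNat hpre rfl, mul_comm]
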